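-- pv_equiv track=rewrite | github.com/agentidx/agentindex | smedjan/scripts/A9_followup_slug_drift.py | make_slug_legacy
-- ===== SOURCE A (Python) =====
-- import unicodedata
--
-- _STRIP_CHARS = "/\\()[]{}:;,!?@#$%^&*=+|<>~`\"'"
--
-- def make_slug_legacy(name: str) -> str:
--     """Reproduces the pre-drift slug generator inferred from stored-slug
--     samples: NFKD + ASCII-ignore, dropped `_` entirely, did NOT collapse
--     `--`, did NOT strip edge `-`. Every other rule matches current
--     _make_slug."""
--     s = (name or "")
--     s = unicodedata.normalize("NFKD", s).encode("ascii", "ignore").decode("ascii")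
--     s = s.lower().strip()
--     for ch in _STRIP_CHARS:
--         s = s.replace(ch, "")
--     s = s.replace(" ", "-").replace(".", "-")
--     s = s.replace("_", "")  # legacy: drop
--     return s
-- ===== SOURCE B (Python) =====
-- import unicodedata
--
-- _STRIP_CHARS = "/\\()[]{}:;,!?@#$%^&*=+|<>~`\"'"
-- _DROP = frozenset(_STRIP_CHARS + "_")
--
-- def make_slug_legacy(name: str) -> str:
--     """One pass over the characters instead of ~30 whole-string replace scans:
--     drop strip-chars and '_', map ' ' and '.' to '-', keep the rest."""
--     s = (name or "")
--     s = unicodedata.normalize("NFKD", s).encode("ascii", "ignore").decode("ascii")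
--     s = s.lower().strip()
--     return "".join("-" if c in " ." else c for c in s if c not in _DROP)
-- ===== Notes on version B (the rewrite author's own statement) =====
-- stated objective: simpler
-- what changed: The chain of ~30 whole-string replace passes is collapsed into a single per-character pass (a joined generator) that drops strip-chars and '_', maps ' ' and '.' to '-', and keeps everything else.
import Mathlib
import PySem

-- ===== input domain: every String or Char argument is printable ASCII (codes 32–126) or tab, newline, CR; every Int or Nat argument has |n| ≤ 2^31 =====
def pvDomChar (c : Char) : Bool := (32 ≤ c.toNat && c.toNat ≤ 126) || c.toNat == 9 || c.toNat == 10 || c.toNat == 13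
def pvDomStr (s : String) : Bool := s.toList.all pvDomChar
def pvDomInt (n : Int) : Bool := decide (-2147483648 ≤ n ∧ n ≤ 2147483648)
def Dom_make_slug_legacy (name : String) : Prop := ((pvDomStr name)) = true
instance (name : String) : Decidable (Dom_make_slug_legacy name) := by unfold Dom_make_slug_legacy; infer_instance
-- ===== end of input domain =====

-- B replaces A's chain of ~30 whole-string `replace` passes by a single per-character pass
-- (drop strip-chars and '_', map ' ' and '.' to '-'); objective: simpler. Exact on the ASCII domain (Dom).


-- ===== PORT A =====
def pv_STRIP_CHARS : String := "/\\()[]{}:;,!?@#$%^&*=+|<>~`\"'"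

-- `name or ""` is `name` itself for a str argument ("" stays "");
-- NFKD + encode('ascii','ignore') is the identity on the ASCII domain (Dom) these theorems cover, so it is ported as the identity.
def make_slug_legacy (name : String) : String :=
  let s1 := PySem.Str.strip (PySem.Str.lower name)
  let s2 := pv_STRIP_CHARS.toList.foldl (fun t ch => PySem.Str.replace t (String.ofList [ch]) "") s1
  let s3 := PySem.Str.replace (PySem.Str.replace s2 " " "-") "." "-"
  PySem.Str.replace s3 "_" ""

-- ===== PORT B =====
def pv_DROP : List Char := PySem.Set.ofList (pv_STRIP_CHARS.toList ++ ['_'])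

def make_slug_legacy_alt (name : String) : String :=
  let s := PySem.Str.strip (PySem.Str.lower name)
  String.ofList
    ((s.toList.filter (fun c => !(pv_DROP.contains c))).map
      (fun c => if c == ' ' || c == '.' then '-' else c))

-- ===== PRECONDITION & SPEC =====
def Spec_make_slug_legacy (name : String) (out : String) : Prop := out = make_slug_legacy_alt name
instance (name : String) (out : String) : Decidable (Spec_make_slug_legacy name out) := by unfold Spec_make_slug_legacy; infer_instance

-- ===== CLAIM (what is proved, stated in full; the proofs are below) =====
def Claim_equal_make_slug_legacy : Prop := ∀ (name : String), Dom_make_slug_legacy name → Spec_make_slug_legacy name (make_slug_legacy name)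

-- ===== LEMMAS AND PROOFS =====

-- replace.go on a single-character pattern, given enough fuel, rewrites each occurrence pointwise
theorem pv_replace_go_single (k : Char) (m : List Char) :
    ∀ (l acc : List Char) (fuel : Nat), l.length ≤ fuel →
      PySem.Chars.replace.go [k] m fuel l acc
        = acc.reverse ++ l.flatMap (fun x => if x = k then m else [x]) := by
  intro l
  induction l with
  | nil =>
    intro acc fuel _
    cases fuel <;> simp [PySem.Chars.replace.go]
  | cons c t ih =>
    intro acc fuel hf
    cases fuel with
    | zero => simp at hf
    | succ fuel =>
      rw [PySem.Chars.replace.go.eq_def]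
      have hpre : List.isPrefixOf [k] (c :: t) = (k == c) := by
        simp [List.isPrefixOf]
      by_cases hc : k = c
      · subst hc
        simp only [hpre, BEq.rfl, if_true, List.length_singleton, List.drop_succ_cons,
          List.drop_zero]
        rw [ih (m.reverse ++ acc) fuel (by simpa using Nat.le_of_succ_le_succ hf)]
        simp
      · have hb : (k == c) = false := by simp [hc]
        simp only [hpre, hb, Bool.false_eq_true, if_false]
        rw [ih (c :: acc) fuel (by simpa using Nat.le_of_succ_le_succ hf)]
        simp [Ne.symm hc]

-- Python's s.replace(ch, new) for a single character ch is a pointwise flatMap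
theorem pv_replace_single (l : List Char) (k : Char) (m : List Char) :
    PySem.Chars.replace l [k] m = l.flatMap (fun x => if x = k then m else [x]) := by
  rw [PySem.Chars.replace]
  simp only [List.isEmpty_cons, Bool.false_eq_true, if_false]
  simpa using pv_replace_go_single k m l [] l.length le_rfl

-- a loop of single-character deletions is one flatMap over a membership test
theorem pv_stripFold (ks : List Char) : ∀ (l : List Char),
    ks.foldl (fun t k => t.flatMap (fun x => if x = k then [] else [x])) l
      = l.flatMap (fun c => if ks.contains c then [] else [c]) := by
  induction ks with
  | nil => intro l; simp
  | cons k ks ih =>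
    intro l
    rw [List.foldl_cons, ih, List.flatMap_assoc]
    apply List.flatMap_congr
    intro c _
    by_cases hc : c = k
    · simp [hc]
    · simp [hc]

-- bridge: the string-level foldl of A's loop, seen on the char-list side
theorem pv_foldl_replace_toList (ks : List Char) : ∀ (s : String),
    (ks.foldl (fun t ch => PySem.Str.replace t (String.ofList [ch]) "") s).toList
      = ks.foldl (fun t k => PySem.Chars.replace t [k] []) s.toList := by
  induction ks with
  | nil => intro s; rfl
  | cons k ks ih =>
    intro s
    rw [List.foldl_cons, List.foldl_cons, ih]
    congr 1
    simp [PySem.Str.toList_replace]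

-- B's filter-then-map comprehension is a flatMap
theorem pv_filter_map_flatMap (l : List Char) (p : Char → Bool) (f : Char → Char) :
    (l.filter p).map f = l.flatMap (fun c => if p c then [f c] else []) := by
  induction l with
  | nil => rfl
  | cons c t ih => by_cases h : p c <;> simp [h, ih]

theorem pv_main (name : String) : make_slug_legacy name = make_slug_legacy_alt name := by
  unfold make_slug_legacy make_slug_legacy_alt
  apply String.toList_inj.mp
  have h1 : " ".toList = [' '] := rfl
  have h2 : ".".toList = ['.'] := rfl
  have h3 : "_".toList = ['_'] := rfl
  have h4 : "-".toList = ['-'] := rfl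
  have h5 : "".toList = ([] : List Char) := rfl
  simp only [PySem.Str.toList_replace, pv_foldl_replace_toList, pv_replace_single,
    pv_stripFold, String.toList_ofList, pv_filter_map_flatMap, h1, h2, h3, h4, h5,
    List.flatMap_assoc]
  apply List.flatMap_congr
  intro c _
  have hdmem : ∀ x : Char, x ∈ pv_DROP ↔ (x ∈ pv_STRIP_CHARS.toList ∨ x = '_') := by
    intro x; rw [pv_DROP, PySem.Set.mem_ofList]; simp
  by_cases hs : c ∈ pv_STRIP_CHARS.toList
  · simp [hs, (hdmem c).mpr (Or.inl hs)]
  · by_cases hu : c = '_'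
    · subst hu; simp [hs, (hdmem '_').mpr (Or.inr rfl)]
    · have hnd : c ∉ pv_DROP := by
        rw [hdmem]; rintro (h | h); exact hs h; exact hu h
      by_cases hsp : c = ' '
      · subst hsp; simp [hs, hnd]
      · by_cases hdot : c = '.'
        · subst hdot; simp [hs, hnd]
        · simp [hs, hnd, hu, hsp, hdot]

-- ===== VERDICT (by name: the statement is the Claim_ definition above) =====
theorem make_slug_legacy_spec : Claim_equal_make_slug_legacy := by
  intro name _
  unfold Spec_make_slug_legacy
  exact pv_main name
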